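-- pv_equiv track=rewrite | github.com/lancethomps/ltpylib | ltpylib/strconverters.py | find_sep_char
-- ===== SOURCE A (Python) =====
-- from typing import Callable, List, Union
--
-- SEARCH_SEP_CHARS: List[str] = [
--   " ",
--   "_",
--   "-",
--   ".",
-- ]
--
-- def find_sep_char(val: str) -> str:
--   if val.count(" ") > 0:
--     return " "
--
--   sep = ""
--   count: int = -1
--   for sep_char in SEARCH_SEP_CHARS:
--     sep_char_count = val.count(sep_char)
--     if sep_char_count > count:
--       count = sep_char_count
--       sep = sep_char
--
--   return sep
-- ===== SOURCE B (Python) =====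
-- from typing import List
--
-- SEARCH_SEP_CHARS: List[str] = [
--   " ",
--   "_",
--   "-",
--   ".",
-- ]
--
-- def find_sep_char(val: str) -> str:
--   if " " in val:
--     return " "
--   order = "_-."
--   seps = sorted((c for c in val if c in order), key=order.index)
--   best = " "
--   best_len = 0
--   i = 0
--   n = len(seps)
--   while i < n:
--     j = i + 1
--     while j < n and seps[j] == seps[i]:
--       j += 1
--     if j - i > best_len:
--       best = seps[i]
--       best_len = j - i
--     i = j
--   return best
-- ===== Notes on version B (the rewrite author's own statement) =====
-- stated objective: alternative
-- what changed: Replaces A's four per-candidate val.count() scans and running-best loop with a sort-then-scan algorithm: filter the string down to separator characters, stably sort them by candidate priority, and scan the sorted list's runs keeping the first longest run (default ' ').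
import Mathlib
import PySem

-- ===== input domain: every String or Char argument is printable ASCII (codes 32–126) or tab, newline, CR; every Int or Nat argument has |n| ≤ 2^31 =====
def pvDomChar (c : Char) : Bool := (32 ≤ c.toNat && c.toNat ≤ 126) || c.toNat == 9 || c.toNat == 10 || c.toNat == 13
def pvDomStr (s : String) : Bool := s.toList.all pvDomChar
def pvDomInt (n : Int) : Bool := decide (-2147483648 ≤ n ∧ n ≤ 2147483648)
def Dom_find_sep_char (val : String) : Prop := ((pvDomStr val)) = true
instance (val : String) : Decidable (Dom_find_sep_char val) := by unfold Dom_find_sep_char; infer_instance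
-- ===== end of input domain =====

-- B replaces A's per-candidate count scans with filter + stable sort by candidate priority + longest-run scan (objective: alternative algorithm); equal return value proved below.


-- ===== PORT A =====
def SEARCH_SEP_CHARS : List String := [" ", "_", "-", "."]

def find_sep_char (val : String) : String :=
  if (PySem.Str.count val " " : Int) > 0 then " "
  else
    (SEARCH_SEP_CHARS.foldl (fun (st : String × Int) sep_char =>
      let sep_char_count : Int := (PySem.Str.count val sep_char : Int)
      if sep_char_count > st.2 then (sep_char, sep_char_count) else st) ("", -1)).1

-- ===== PORT B =====
-- Source B's outer/inner while loops: the inner `while seps[j] == seps[i]` computes the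
-- run length (run = j - i = takeWhile length + 1) and `i = j` drops that run
def runScan (seps : List Char) (best : Char) (bestLen : Nat) : Char :=
  match seps with
  | [] => best
  | c :: rest =>
    let run := (rest.takeWhile (· == c)).length + 1
    let rest' := rest.dropWhile (· == c)
    if run > bestLen then runScan rest' c run else runScan rest' best bestLen
termination_by seps.length
decreasing_by
  all_goals
    simp only [List.length_cons]
    exact Nat.lt_succ_of_le (List.length_dropWhile_le _ _)

-- sort key = order.index(c); each sorted element occurs in order = "_-.", where index = find
def find_sep_char_alt (val : String) : String :=
  if PySem.Str.isIn " " val then " "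
  else
    let seps := PySem.List.sorted
      (val.toList.filter (fun c => PySem.Chars.isIn [c] "_-.".toList))
      (fun c => PySem.Str.find "_-." (String.singleton c)) false
    String.singleton (runScan seps ' ' 0)

-- ===== PRECONDITION & SPEC =====
def Spec_find_sep_char (val : String) (out : String) : Prop := out = find_sep_char_alt val
instance (val : String) (out : String) : Decidable (Spec_find_sep_char val out) := by unfold Spec_find_sep_char; infer_instance

-- ===== CLAIM (what is proved, stated in full; the proofs are below) =====
def Claim_equal_find_sep_char : Prop := ∀ (val : String), Dom_find_sep_char val → Spec_find_sep_char val (find_sep_char val)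

-- ===== LEMMAS AND PROOFS =====

-- B's sort key, named for the proofs
def bKey (c : Char) : Int := PySem.Str.find "_-." (String.singleton c)

-- the canonical sorted shape: all underscores, then dashes, then dots
def canon (a b c : Nat) : List Char :=
  List.replicate a '_' ++ (List.replicate b '-' ++ List.replicate c '.')

-- the value both programs compute in the no-space branch, as one closed formula
def pick (a b c : Nat) : Char :=
  if c > a ∧ c > b then '.' else if b > a then '-' else if a > 0 then '_' else ' '

theorem insertBy_canon_underscore (a b c : Nat) :
    PySem.List.insertBy (fun x y => decide (bKey x < bKey y)) '_' (canon a b c)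
      = canon (a + 1) b c := by
  induction a with
  | zero =>
    cases b with
    | zero =>
      cases c with
      | zero => simp [canon, PySem.List.insertBy]
      | succ c =>
        simp [canon, List.replicate_succ, PySem.List.insertBy] <;> decide
    | succ b =>
      simp [canon, List.replicate_succ, PySem.List.insertBy] <;> decide
  | succ a ih =>
    calc PySem.List.insertBy (fun x y => decide (bKey x < bKey y)) '_' (canon (a+1) b c)
        = '_' :: PySem.List.insertBy (fun x y => decide (bKey x < bKey y)) '_' (canon a b c) := by
          simp [canon, List.replicate_succ, PySem.List.insertBy]
      _ = canon (a + 2) b c := by rw [ih]; simp [canon, List.replicate_succ]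

theorem insertBy_canon_dash (a b c : Nat) :
    PySem.List.insertBy (fun x y => decide (bKey x < bKey y)) '-' (canon a b c)
      = canon a (b + 1) c := by
  induction a with
  | zero =>
    induction b with
    | zero =>
      cases c with
      | zero => simp [canon, PySem.List.insertBy]
      | succ c => simp [canon, List.replicate_succ, PySem.List.insertBy] <;> decide
    | succ b ihb =>
      calc PySem.List.insertBy (fun x y => decide (bKey x < bKey y)) '-' (canon 0 (b+1) c)
          = '-' :: PySem.List.insertBy (fun x y => decide (bKey x < bKey y)) '-' (canon 0 b c) := by
            simp [canon, List.replicate_succ, PySem.List.insertBy] <;> decide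
        _ = canon 0 (b + 2) c := by rw [ihb]; simp [canon, List.replicate_succ]
  | succ a ih =>
    calc PySem.List.insertBy (fun x y => decide (bKey x < bKey y)) '-' (canon (a+1) b c)
        = '_' :: PySem.List.insertBy (fun x y => decide (bKey x < bKey y)) '-' (canon a b c) := by
          simp [canon, List.replicate_succ, PySem.List.insertBy] <;> decide
      _ = canon (a + 1) (b + 1) c := by rw [ih]; simp [canon, List.replicate_succ]

theorem insertBy_canon_dot (a b c : Nat) :
    PySem.List.insertBy (fun x y => decide (bKey x < bKey y)) '.' (canon a b c)
      = canon a b (c + 1) := by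
  induction a with
  | zero =>
    induction b with
    | zero =>
      induction c with
      | zero => simp [canon, PySem.List.insertBy]
      | succ c ihc =>
        calc PySem.List.insertBy (fun x y => decide (bKey x < bKey y)) '.' (canon 0 0 (c+1))
            = '.' :: PySem.List.insertBy (fun x y => decide (bKey x < bKey y)) '.' (canon 0 0 c) := by
              simp [canon, List.replicate_succ, PySem.List.insertBy] <;> decide
          _ = canon 0 0 (c + 2) := by rw [ihc]; simp [canon, List.replicate_succ]
    | succ b ihb =>
      calc PySem.List.insertBy (fun x y => decide (bKey x < bKey y)) '.' (canon 0 (b+1) c)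
          = '-' :: PySem.List.insertBy (fun x y => decide (bKey x < bKey y)) '.' (canon 0 b c) := by
            simp [canon, List.replicate_succ, PySem.List.insertBy] <;> decide
        _ = canon 0 (b + 1) (c + 1) := by rw [ihb]; simp [canon, List.replicate_succ]
  | succ a ih =>
    calc PySem.List.insertBy (fun x y => decide (bKey x < bKey y)) '.' (canon (a+1) b c)
        = '_' :: PySem.List.insertBy (fun x y => decide (bKey x < bKey y)) '.' (canon a b c) := by
          simp [canon, List.replicate_succ, PySem.List.insertBy] <;> decide
      _ = canon (a + 1) b (c + 1) := by rw [ih]; simp [canon, List.replicate_succ]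

theorem foldl_insertBy_canon (l : List Char) :
    ∀ (a b c : Nat), (∀ x ∈ l, x = '_' ∨ x = '-' ∨ x = '.') →
    l.foldl (fun acc x => PySem.List.insertBy (fun p q => decide (bKey p < bKey q)) x acc)
        (canon a b c)
      = canon (a + l.count '_') (b + l.count '-') (c + l.count '.') := by
  induction l with
  | nil => intro a b c _; simp
  | cons x t ih =>
    intro a b c h
    have hx := h x (by simp)
    have ht : ∀ y ∈ t, y = '_' ∨ y = '-' ∨ y = '.' := fun y hy => h y (by simp [hy])
    rcases hx with hx | hx | hx <;> subst hx <;>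
      simp only [List.foldl_cons, insertBy_canon_underscore, insertBy_canon_dash,
        insertBy_canon_dot, ih _ _ _ ht, List.count_cons] <;>
      norm_num <;> congr 1 <;> omega

-- the stable insertion sort on a list over {'_','-','.'} yields the canonical block shape
theorem sorted_canon (l : List Char) (h : ∀ x ∈ l, x = '_' ∨ x = '-' ∨ x = '.') :
    PySem.List.sorted l bKey false = canon (l.count '_') (l.count '-') (l.count '.') := by
  rw [PySem.List.sorted_eq_foldl_insertBy]
  have := foldl_insertBy_canon l 0 0 0 h
  simpa [canon] using this

-- splitting a replicate block off takeWhile/dropWhile when the tail starts differently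
theorem tw_dw_rep (x : Char) (n : Nat) (l : List Char)
    (h : ∀ y, l.head? = some y → (y == x) = false) :
    (List.replicate n x ++ l).takeWhile (· == x) = List.replicate n x ∧
    (List.replicate n x ++ l).dropWhile (· == x) = l := by
  induction n with
  | zero =>
    cases l with
    | nil => simp
    | cons y t => have := h y rfl; simp [List.takeWhile_cons, List.dropWhile_cons, this]
  | succ n ih =>
    simp [List.replicate_succ, List.takeWhile_cons, List.dropWhile_cons, ih]

theorem runScan_dot (c : Nat) (best : Char) (len : Nat) :
    runScan (List.replicate c '.') best len = if len < c then '.' else best := by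
  cases c with
  | zero => simp [runScan]
  | succ c =>
    have h := tw_dw_rep '.' c ([] : List Char) (by simp)
    rw [List.replicate_succ, runScan]
    simp only [List.append_nil] at h
    rw [h.1, h.2]
    simp only [List.length_replicate]
    split_ifs with h1 h2 h2 <;> simp [runScan] <;> omega

theorem head_ne_rep_append (b c : Nat) :
    ∀ y, (List.replicate b '-' ++ List.replicate c '.').head? = some y → (y == '_') = false := by
  cases b <;> cases c <;> intro y hy <;> simp [List.replicate_succ] at hy <;>
    first | (subst hy; decide) | exact absurd hy (by simp)

theorem head_ne_rep_dot (c : Nat) :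
    ∀ y, (List.replicate c '.').head? = some y → (y == '-') = false := by
  cases c <;> intro y hy <;> simp [List.replicate_succ] at hy <;>
    first | (subst hy; decide) | exact absurd hy (by simp)

theorem runScan_dashdot (b c : Nat) (best : Char) (len : Nat) :
    runScan (List.replicate b '-' ++ List.replicate c '.') best len
      = runScan (List.replicate c '.') (if len < b then '-' else best) (max b len) := by
  cases b with
  | zero => simp
  | succ b =>
    have h := tw_dw_rep '-' b (List.replicate c '.') (head_ne_rep_dot c)
    rw [List.replicate_succ, List.cons_append, runScan]
    simp only [List.takeWhile_append] at *
    rw [h.1, h.2]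
    simp only [List.length_replicate]
    split_ifs with h1 h2 h2 <;> first | (congr 1 <;> omega) | omega | rfl

-- B's run scan over the canonical shape computes pick
theorem runScan_canon (a b c : Nat) : runScan (canon a b c) ' ' 0 = pick a b c := by
  have step1 : runScan (canon a b c) ' ' 0
      = runScan (List.replicate b '-' ++ List.replicate c '.')
          (if 0 < a then '_' else ' ') a := by
    cases a with
    | zero => simp [canon]
    | succ a =>
      have h := tw_dw_rep '_' a (List.replicate b '-' ++ List.replicate c '.')
        (head_ne_rep_append b c)
      rw [canon, List.replicate_succ, List.cons_append, runScan]
      rw [h.1, h.2]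
      simp only [List.length_replicate]
      split_ifs with h1 h2 <;> first | rfl | omega
  rw [step1, runScan_dashdot, runScan_dot, pick]
  split_ifs <;> first | rfl | omega

-- Chars.count.go with a one-character needle and enough fuel is List.count.
theorem count_go_singleton (c : Char) : ∀ (fuel : Nat) (l : List Char) (acc : Nat),
    l.length ≤ fuel → PySem.Chars.count.go [c] fuel l acc = acc + l.count c := by
  intro fuel
  induction fuel with
  | zero =>
    intro l acc h
    cases l with
    | nil => simp [PySem.Chars.count.go]
    | cons hd t => simp at h
  | succ n ih =>
    intro l acc h
    cases l with
    | nil => simp [PySem.Chars.count.go]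
    | cons hd t =>
      rw [PySem.Chars.count.go]
      simp only [List.isPrefixOf, List.length_cons] at *
      by_cases hh : c = hd
      · subst hh
        simp only [BEq.rfl, Bool.and_eq_true]
        simp [ih t (acc + 1) (by omega)]
        omega
      · have : (c == hd) = false := by simp [hh]
        simp [this, ih t acc (by omega), List.count_cons]
        exact fun e => hh e.symm

theorem count_singleton (s : List Char) (c : Char) :
    PySem.Chars.count s [c] = s.count c := by
  unfold PySem.Chars.count
  simp [count_go_singleton c s.length s 0 le_rfl]

-- ===== VERDICT (by name: the statement is the Claim_ definition above) =====
theorem find_sep_char_spec : Claim_equal_find_sep_char := by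
  unfold Claim_equal_find_sep_char Spec_find_sep_char
  intro val _
  unfold find_sep_char find_sep_char_alt SEARCH_SEP_CHARS
  have hsp : PySem.Str.isIn " " val = true ↔ ' ' ∈ val.toList := by
    rw [PySem.Str.isIn_eq]
    show PySem.Chars.isIn [' '] val.toList = true ↔ _
    rw [PySem.Chars.isIn_iff_infix, List.singleton_infix_iff]
  simp only [PySem.Str.count_eq]
  show (if ((PySem.Chars.count val.toList [' '] : Int) > 0) then " " else _) = _
  by_cases h : ' ' ∈ val.toList
  · have h1 : ((PySem.Chars.count val.toList [' '] : Int) > 0) := by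
      rw [count_singleton]
      exact_mod_cast List.count_pos_iff.mpr h
    rw [if_pos h1, if_pos (hsp.mpr h)]
  · have h0 : val.toList.count ' ' = 0 := List.count_eq_zero.mpr h
    have h1 : ¬ ((PySem.Chars.count val.toList [' '] : Int) > 0) := by
      rw [count_singleton, h0]; omega
    have h2 : ¬ (PySem.Str.isIn " " val = true) := fun hc => h (hsp.mp hc)
    rw [if_neg h1, if_neg h2]
    set l := val.toList with hl
    set f := l.filter (fun c => PySem.Chars.isIn [c] "_-.".toList) with hf
    have hmem : ∀ x ∈ f, x = '_' ∨ x = '-' ∨ x = '.' := by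
      intro x hx
      rw [hf, List.mem_filter] at hx
      have := hx.2
      rw [PySem.Chars.isIn_iff_infix, List.singleton_infix_iff] at this
      simpa using this
    have hkey : (fun c => PySem.Str.find "_-." (String.singleton c)) = bKey := rfl
    rw [hkey, sorted_canon f hmem]
    have c1 : f.count '_' = l.count '_' := List.count_filter (by decide)
    have c2 : f.count '-' = l.count '-' := List.count_filter (by decide)
    have c3 : f.count '.' = l.count '.' := List.count_filter (by decide)
    rw [c1, c2, c3, runScan_canon]
    have t0 : (" " : String).toList = [' '] := rfl
    have t1 : ("_" : String).toList = ['_'] := rfl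
    have t2 : ("-" : String).toList = ['-'] := rfl
    have t3 : ("." : String).toList = ['.'] := rfl
    simp only [List.foldl_cons, List.foldl_nil, t0, t1, t2, t3, count_singleton, h0, pick]
    split_ifs <;> first | rfl | decide | omega
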